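-- pv_equiv track=rewrite | github.com/Thejshri-A/Python-1000 | 685. Soil Type Permeability.py | soil_type_permeability
-- ===== SOURCE A (Python) =====
-- def soil_type_permeability(rates = [12, 8, 3]):
--     classify=[]
--     for rate in rates:
--         if rate>10:
--             classify.append("High")
--         elif rate>5:
--             classify.append("Moderate")
--         else:
--             classify.append("Low")
--     return classify
-- ===== SOURCE B (Python) =====
-- import bisect
--
-- _THRESHOLDS = [5, 10]
-- _LABELS = ["Low", "Moderate", "High"]
--
-- def soil_type_permeability(rates = [12, 8, 3]):
--     return [_LABELS[bisect.bisect_left(_THRESHOLDS, rate)] for rate in rates]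
-- ===== Notes on version B (the rewrite author's own statement) =====
-- stated objective: idiomatic
-- what changed: Replaces the if/elif chain inside an accumulator loop with a sorted two-threshold table indexed by bisect_left, mapped over the input in a comprehension.
import Mathlib
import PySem

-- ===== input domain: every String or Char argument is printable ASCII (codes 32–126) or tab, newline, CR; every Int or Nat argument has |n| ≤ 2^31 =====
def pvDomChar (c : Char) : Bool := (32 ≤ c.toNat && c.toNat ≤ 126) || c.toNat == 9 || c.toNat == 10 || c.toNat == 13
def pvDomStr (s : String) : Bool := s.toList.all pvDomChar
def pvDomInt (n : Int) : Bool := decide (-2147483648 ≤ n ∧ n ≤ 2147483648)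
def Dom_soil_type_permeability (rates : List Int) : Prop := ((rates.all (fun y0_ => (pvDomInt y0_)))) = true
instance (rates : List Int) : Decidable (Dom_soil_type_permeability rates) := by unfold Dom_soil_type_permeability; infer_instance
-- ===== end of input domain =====

-- B replaces A's if/elif chain in an accumulator loop with a sorted threshold table
-- indexed by bisect_left, mapped over the input (idiomatic; same cost).


-- ===== PORT A =====
def soil_type_permeability (rates : List Int) : List String :=
  rates.foldl (fun classify rate =>
    if rate > 10 then classify ++ ["High"]
    else if rate > 5 then classify ++ ["Moderate"]
    else classify ++ ["Low"]) []

-- ===== PORT B =====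
-- bisect.bisect_left on a sorted list = number of elements strictly less than the key
def pvBisectLeft (xs : List Int) (x : Int) : Nat := xs.countP (fun t => t < x)

def pvThresholds : List Int := [5, 10]
def pvLabels : List String := ["Low", "Moderate", "High"]

def soil_type_permeability_alt (rates : List Int) : List String :=
  rates.map (fun rate => pvLabels.getD (pvBisectLeft pvThresholds rate) "")

-- ===== PRECONDITION & SPEC =====
def Spec_soil_type_permeability (rates : List Int) (out : List String) : Prop := out = soil_type_permeability_alt rates
instance (rates : List Int) (out : List String) : Decidable (Spec_soil_type_permeability rates out) := by unfold Spec_soil_type_permeability; infer_instance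

-- ===== CLAIM (what is proved, stated in full; the proofs are below) =====
def Claim_equal_soil_type_permeability : Prop := ∀ (rates : List Int), Dom_soil_type_permeability rates → Spec_soil_type_permeability rates (soil_type_permeability rates)

-- ===== LEMMAS AND PROOFS =====

-- per-element agreement of the two classifications
lemma pv_elem_eq (rate : Int) :
    (if rate > 10 then "High" else if rate > 5 then "Moderate" else "Low")
      = pvLabels.getD (pvBisectLeft pvThresholds rate) "" := by
  simp only [pvBisectLeft, pvThresholds, pvLabels, List.countP_cons, List.countP_nil]
  split_ifs with h1 h2 <;> simp_all <;> omega

-- A's foldl with a seed accumulator, expressed as accumulator ++ map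
lemma pv_foldl_eq (rates : List Int) (acc : List String) :
    rates.foldl (fun classify rate =>
      if rate > 10 then classify ++ ["High"]
      else if rate > 5 then classify ++ ["Moderate"]
      else classify ++ ["Low"]) acc
    = acc ++ rates.map (fun rate => pvLabels.getD (pvBisectLeft pvThresholds rate) "") := by
  induction rates generalizing acc with
  | nil => simp
  | cons r rs ih =>
    simp only [List.foldl_cons, List.map_cons]
    rw [ih]
    have := pv_elem_eq r
    split_ifs with h1 h2 <;> simp_all

-- ===== VERDICT (by name: the statement is the Claim_ definition above) =====
theorem soil_type_permeability_spec : Claim_equal_soil_type_permeability := by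
  intro rates _
  unfold Spec_soil_type_permeability soil_type_permeability soil_type_permeability_alt
  simpa using pv_foldl_eq rates []
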